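-- pv_equiv track=rewrite | github.com/Mohit4022-cloud/EmailDJ | hub-api/email_generation/remix_engine.py | _validation_feedback
-- ===== SOURCE A (Python) =====
-- _CLAIM_VIOLATION_PREFIXES = (
--     "unsubstantiated_statistical_claim",
--     "unsubstantiated_performance_claim",
--     "unsubstantiated_claim",
-- )
--
-- def _claim_violations(violations: list[str]) -> list[str]:
--     return [entry for entry in violations if entry and entry.split(":", 1)[0] in _CLAIM_VIOLATION_PREFIXES]
--
-- def _validation_feedback(violations: list[str]) -> str:
--     notes = ["Rewrite and fix these violations exactly: " + "; ".join(violations)]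
--     claim_violations = _claim_violations(violations)
--     if claim_violations:
--         notes.append(
--             "Claims policy: keep claims qualitative unless the exact quantified claim is in approved proof text."
--         )
--     if any(v.startswith("fluency_") for v in violations):
--         notes.append(
--             "Fluency policy: produce complete grammatical sentences, no abrupt endings, no unmatched punctuation, "
--             "and no duplicated sentence."
--         )
--     if any(v.startswith("missing_required_field:") for v in violations):
--         notes.append(
--             "Required fields policy: keep prospect first name, prospect company, offer lock, and exact CTA present."
--         )
--     if any(v.startswith("meta_commentary") for v in violations):
--         notes.append(
--             "Meta-commentary policy: remove any sentence that describes the email's compliance or "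
--             "construction (e.g. 'This email follows...', 'This keeps messaging...'). "
--             "The body must be pure outbound copy — never reference the email itself."
--         )
--     if any(v.startswith("prospect_owns_offer_lock") for v in violations):
--         notes.append(
--             "Ownership policy: OFFER_LOCK is our offering. Never phrase it as the prospect's product "
--             "(forbidden: '<Prospect>'s OFFER_LOCK' or 'your OFFER_LOCK')."
--         )
--     if any(v.startswith("offer_drift") for v in violations):
--         notes.append(
--             "Offer drift policy: the email body must clearly and explicitly pitch the OFFER_LOCK. "
--             "Use the offer's actual name, not a paraphrase or category description."
--         )
--     return " ".join(notes)
-- ===== SOURCE B (Python) =====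
-- _CLAIM_VIOLATION_PREFIXES = (
--     "unsubstantiated_statistical_claim",
--     "unsubstantiated_performance_claim",
--     "unsubstantiated_claim",
-- )
--
--
-- def _validation_feedback(violations: list[str]) -> str:
--     # Single pass: set six flags, then emit the policy notes in the fixed order.
--     has_claim = has_fluency = has_missing = has_meta = has_own = has_drift = False
--     for v in violations:
--         if v and v.split(":", 1)[0] in _CLAIM_VIOLATION_PREFIXES:
--             has_claim = True
--         if v.startswith("fluency_"):
--             has_fluency = True
--         if v.startswith("missing_required_field:"):
--             has_missing = True
--         if v.startswith("meta_commentary"):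
--             has_meta = True
--         if v.startswith("prospect_owns_offer_lock"):
--             has_own = True
--         if v.startswith("offer_drift"):
--             has_drift = True
--     parts = ["Rewrite and fix these violations exactly: " + "; ".join(violations)]
--     if has_claim:
--         parts.append(
--             "Claims policy: keep claims qualitative unless the exact quantified claim is in approved proof text."
--         )
--     if has_fluency:
--         parts.append(
--             "Fluency policy: produce complete grammatical sentences, no abrupt endings, no unmatched punctuation, "
--             "and no duplicated sentence."
--         )
--     if has_missing:
--         parts.append(
--             "Required fields policy: keep prospect first name, prospect company, offer lock, and exact CTA present."
--         )
--     if has_meta: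
--         parts.append(
--             "Meta-commentary policy: remove any sentence that describes the email's compliance or "
--             "construction (e.g. 'This email follows...', 'This keeps messaging...'). "
--             "The body must be pure outbound copy — never reference the email itself."
--         )
--     if has_own:
--         parts.append(
--             "Ownership policy: OFFER_LOCK is our offering. Never phrase it as the prospect's product "
--             "(forbidden: '<Prospect>'s OFFER_LOCK' or 'your OFFER_LOCK')."
--         )
--     if has_drift:
--         parts.append(
--             "Offer drift policy: the email body must clearly and explicitly pitch the OFFER_LOCK. "
--             "Use the offer's actual name, not a paraphrase or category description."
--         )
--     return " ".join(parts)
-- ===== Notes on version B (the rewrite author's own statement) =====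
-- stated objective: alternative
-- what changed: Replaces the claim-filter pass plus five separate any() scans over the violation list with one loop that sets six boolean flags, then appends the policy notes guarded by the flags.
import Mathlib
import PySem

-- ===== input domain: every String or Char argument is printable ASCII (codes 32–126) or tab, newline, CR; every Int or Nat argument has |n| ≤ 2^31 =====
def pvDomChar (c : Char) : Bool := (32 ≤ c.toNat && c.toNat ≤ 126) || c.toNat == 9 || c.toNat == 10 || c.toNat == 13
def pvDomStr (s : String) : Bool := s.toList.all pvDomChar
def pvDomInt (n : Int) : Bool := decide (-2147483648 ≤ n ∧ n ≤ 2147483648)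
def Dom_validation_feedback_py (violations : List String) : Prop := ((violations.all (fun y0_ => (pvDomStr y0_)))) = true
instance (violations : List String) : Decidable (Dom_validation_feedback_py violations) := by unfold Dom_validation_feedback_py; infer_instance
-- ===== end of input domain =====

-- B replaces the claim-filter pass plus five any() scans by one flag-setting loop; same output, stated alternative (no speed claim).

-- shared string constants (identical literals in both Python versions)
def pvClaimPrefixes : List String :=
  ["unsubstantiated_statistical_claim", "unsubstantiated_performance_claim", "unsubstantiated_claim"]

def pvNoteClaims : String :=
  "Claims policy: keep claims qualitative unless the exact quantified claim is in approved proof text."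
def pvNoteFluency : String :=
  "Fluency policy: produce complete grammatical sentences, no abrupt endings, no unmatched punctuation, and no duplicated sentence."
def pvNoteMissing : String :=
  "Required fields policy: keep prospect first name, prospect company, offer lock, and exact CTA present."
def pvNoteMeta : String :=
  "Meta-commentary policy: remove any sentence that describes the email's compliance or construction (e.g. 'This email follows...', 'This keeps messaging...'). The body must be pure outbound copy — never reference the email itself."
def pvNoteOwn : String :=
  "Ownership policy: OFFER_LOCK is our offering. Never phrase it as the prospect's product (forbidden: '<Prospect>'s OFFER_LOCK' or 'your OFFER_LOCK')."
def pvNoteDrift : String :=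
  "Offer drift policy: the email body must clearly and explicitly pitch the OFFER_LOCK. Use the offer's actual name, not a paraphrase or category description."

-- ===== PORT A =====
-- entry and entry.split(":", 1)[0] in _CLAIM_VIOLATION_PREFIXES
def pvIsClaim (entry : String) : Bool :=
  entry != "" &&
    ((PySem.List.pyGet? ((PySem.Str.splitMax? entry ":" 1).getD []) 0).getD "") ∈ pvClaimPrefixes

def pvClaimViolations (violations : List String) : List String :=
  violations.filter (fun entry => pvIsClaim entry)

def validation_feedback_py (violations : List String) : String :=
  let notes := ["Rewrite and fix these violations exactly: " ++ PySem.Str.join "; " violations]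
  let claim_violations := pvClaimViolations violations
  let notes := if claim_violations ≠ [] then notes ++ [pvNoteClaims] else notes
  let notes := if violations.any (fun v => PySem.Str.startswith v "fluency_") then notes ++ [pvNoteFluency] else notes
  let notes := if violations.any (fun v => PySem.Str.startswith v "missing_required_field:") then notes ++ [pvNoteMissing] else notes
  let notes := if violations.any (fun v => PySem.Str.startswith v "meta_commentary") then notes ++ [pvNoteMeta] else notes
  let notes := if violations.any (fun v => PySem.Str.startswith v "prospect_owns_offer_lock") then notes ++ [pvNoteOwn] else notes
  let notes := if violations.any (fun v => PySem.Str.startswith v "offer_drift") then notes ++ [pvNoteDrift] else notes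
  PySem.Str.join " " notes

-- ===== PORT B =====
-- one pass over violations accumulating six flags
def pvStep (st : Bool × Bool × Bool × Bool × Bool × Bool) (v : String) :
    Bool × Bool × Bool × Bool × Bool × Bool :=
  let (c, f, m, me, o, d) := st
  (c || pvIsClaim v,
   f || PySem.Str.startswith v "fluency_",
   m || PySem.Str.startswith v "missing_required_field:",
   me || PySem.Str.startswith v "meta_commentary",
   o || PySem.Str.startswith v "prospect_owns_offer_lock",
   d || PySem.Str.startswith v "offer_drift")

def validation_feedback_py_alt (violations : List String) : String :=
  let (hc, hf, hm, hme, ho, hd) :=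
    violations.foldl pvStep (false, false, false, false, false, false)
  let parts := ["Rewrite and fix these violations exactly: " ++ PySem.Str.join "; " violations]
  let parts := if hc then parts ++ [pvNoteClaims] else parts
  let parts := if hf then parts ++ [pvNoteFluency] else parts
  let parts := if hm then parts ++ [pvNoteMissing] else parts
  let parts := if hme then parts ++ [pvNoteMeta] else parts
  let parts := if ho then parts ++ [pvNoteOwn] else parts
  let parts := if hd then parts ++ [pvNoteDrift] else parts
  PySem.Str.join " " parts

-- ===== PRECONDITION & SPEC =====
def Spec_validation_feedback_py (violations : List String) (out : String) : Prop := out = validation_feedback_py_alt violations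
instance (violations : List String) (out : String) : Decidable (Spec_validation_feedback_py violations out) := by unfold Spec_validation_feedback_py; infer_instance

-- ===== CLAIM (what is proved, stated in full; the proofs are below) =====
def Claim_equal_validation_feedback_py : Prop := ∀ (violations : List String), Dom_validation_feedback_py violations → Spec_validation_feedback_py violations (validation_feedback_py violations)

-- ===== LEMMAS AND PROOFS =====

theorem pvFold_eq (violations : List String) (c f m me o d : Bool) :
    violations.foldl pvStep (c, f, m, me, o, d) =
      (c || violations.any pvIsClaim,
       f || violations.any (fun v => PySem.Str.startswith v "fluency_"),
       m || violations.any (fun v => PySem.Str.startswith v "missing_required_field:"),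
       me || violations.any (fun v => PySem.Str.startswith v "meta_commentary"),
       o || violations.any (fun v => PySem.Str.startswith v "prospect_owns_offer_lock"),
       d || violations.any (fun v => PySem.Str.startswith v "offer_drift")) := by
  induction violations generalizing c f m me o d with
  | nil => simp
  | cons v vs ih => simp [pvStep, ih, Bool.or_assoc]

theorem pvFilter_ne_nil (violations : List String) :
    (pvClaimViolations violations ≠ []) ↔ violations.any pvIsClaim = true := by
  simp [pvClaimViolations, pvIsClaim, List.filter_eq_nil_iff, List.any_eq_true]

theorem validation_feedback_py_spec : Claim_equal_validation_feedback_py := by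
  intro violations _
  show validation_feedback_py violations = validation_feedback_py_alt violations
  rw [validation_feedback_py_alt, pvFold_eq]
  simp only [Bool.false_or]
  rw [validation_feedback_py]
  by_cases h : pvClaimViolations violations ≠ []
  · simp only [if_pos h, if_pos ((pvFilter_ne_nil violations).mp h)]
  · have h2 : ¬ violations.any pvIsClaim = true := fun hh => h ((pvFilter_ne_nil violations).mpr hh)
    simp only [if_neg h, if_neg h2]
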